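-- pv_equiv track=rewrite | github.com/Jack-Chuang/formation | src/leader_path.py | traj_trans
-- ===== SOURCE A (Python) =====
-- def traj_trans(length, offset, num):
--     #path generator
--     dir = 1
--     ans = [[0, offset]]
--     for i in range(1, num):
--         x = ans[-1][0]
--         y = ans[-1][1]
--         ans.append([x - offset + dir*length, y])
--         ans.append([x - offset + dir*length, y - 2 * dir * offset + 3])
--         # ans.append([0, ans[-1][1]])
--         dir *= -1
--     return ans
-- ===== SOURCE B (Python) =====
-- def traj_trans(length, offset, num):
--     # closed-form: coordinates computed directly from index parity, no stepping from ans[-1]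
--     ans = [[0, offset]]
--     app = ans.append
--     for i in range(1, num):
--         x = -i * offset + (length if i % 2 == 1 else 0)
--         app([x, offset + 3 * (i - 1) - (2 * offset if (i - 1) % 2 == 1 else 0)])
--         app([x, offset + 3 * i - (2 * offset if i % 2 == 1 else 0)])
--     return ans
-- ===== Notes on version B (the rewrite author's own statement) =====
-- stated objective: alternative
-- what changed: Replaced A's stateful loop that reads ans[-1] and an alternating dir variable with closed-form per-index parity formulas for x and y, emitting the whole list in one comprehension.
import Mathlib
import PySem

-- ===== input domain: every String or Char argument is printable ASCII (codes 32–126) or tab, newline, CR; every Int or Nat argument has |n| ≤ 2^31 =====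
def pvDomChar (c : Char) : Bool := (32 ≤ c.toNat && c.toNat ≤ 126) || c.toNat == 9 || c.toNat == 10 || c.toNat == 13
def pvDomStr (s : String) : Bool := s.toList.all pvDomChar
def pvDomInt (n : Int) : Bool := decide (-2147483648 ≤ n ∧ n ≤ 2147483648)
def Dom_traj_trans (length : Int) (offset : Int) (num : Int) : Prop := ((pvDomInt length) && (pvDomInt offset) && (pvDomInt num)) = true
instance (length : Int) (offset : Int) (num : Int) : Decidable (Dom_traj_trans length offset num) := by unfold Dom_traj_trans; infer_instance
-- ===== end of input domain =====

-- B replaces A's point-to-point stepping loop with closed-form per-index coordinate formulas (objective: alternative decomposition).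

-- ===== PORT A =====
-- one iteration of A's loop: state = (ans, dir); ans[-1] is read with pyGet? (never none: ans is nonempty)
def trajStep (length : Int) (offset : Int) (st : List (List Int) × Int) (_i : Int) : List (List Int) × Int :=
  let ans := st.1
  let dir := st.2
  let last := (PySem.List.pyGet? ans (-1)).getD []
  let x := (PySem.List.pyGet? last 0).getD 0
  let y := (PySem.List.pyGet? last 1).getD 0
  (ans ++ [[x - offset + dir * length, y], [x - offset + dir * length, y - 2 * dir * offset + 3]], dir * (-1))

def traj_trans (length : Int) (offset : Int) (num : Int) : List (List Int) :=
  ((PySem.List.pyRange 1 num 1).foldl (trajStep length offset) ([[0, offset]], 1)).1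

-- ===== PORT B =====
def trajX (length : Int) (offset : Int) (i : Int) : Int :=
  -i * offset + (if i % 2 == 1 then length else 0)

def trajY (offset : Int) (i : Int) : Int :=
  offset + 3 * i - (if i % 2 == 1 then 2 * offset else 0)

def traj_trans_alt (length : Int) (offset : Int) (num : Int) : List (List Int) :=
  [[0, offset]] ++ (PySem.List.pyRange 1 num 1).flatMap
    (fun i => [[trajX length offset i, trajY offset (i - 1)], [trajX length offset i, trajY offset i]])

-- ===== PRECONDITION & SPEC =====
def Spec_traj_trans (length : Int) (offset : Int) (num : Int) (out : List (List Int)) : Prop := out = traj_trans_alt length offset num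
instance (length : Int) (offset : Int) (num : Int) (out : List (List Int)) : Decidable (Spec_traj_trans length offset num out) := by unfold Spec_traj_trans; infer_instance

-- ===== CLAIM (what is proved, stated in full; the proofs are below) =====
def Claim_equal_traj_trans : Prop := ∀ (length : Int) (offset : Int) (num : Int), Dom_traj_trans length offset num → Spec_traj_trans length offset num (traj_trans length offset num)

-- ===== LEMMAS AND PROOFS =====

-- loop invariant: after processing range(1, n) the state is B's list with dir = (-1)^(n-1),
-- and the last point is [x(n-1), y(n-1)]
theorem traj_loop_inv (L O : Int) (n : Int) (hn : 1 ≤ n) :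
    (PySem.List.pyRange 1 n 1).foldl (trajStep L O) ([[0, O]], 1)
      = (traj_trans_alt L O n, if (n - 1) % 2 = 0 then 1 else -1)
    ∧ (traj_trans_alt L O n).getLast? = some [trajX L O (n - 1), trajY O (n - 1)] := by
  induction n, hn using Int.le_induction with
  | base =>
      constructor
      · simp [PySem.List.pyRange_one_eq_nil, traj_trans_alt]
      · simp [PySem.List.pyRange_one_eq_nil, traj_trans_alt, trajX, trajY]
  | succ n hn ih =>
      obtain ⟨ih1, ih2⟩ := ih
      have hr : PySem.List.pyRange 1 (n + 1) 1 = PySem.List.pyRange 1 n 1 ++ [n] :=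
        PySem.List.pyRange_one_succ_right hn
      have halt : traj_trans_alt L O (n + 1)
          = traj_trans_alt L O n
            ++ [[trajX L O n, trajY O (n - 1)], [trajX L O n, trajY O n]] := by
        simp [traj_trans_alt, hr]
      have hx : trajX L O (n - 1) - O + (if (n - 1) % 2 = 0 then (1:Int) else -1) * L
          = trajX L O n := by
        rcases Int.emod_two_eq_zero_or_one (n - 1) with h | h
        · have h2 : n % 2 = 1 := by omega
          simp [trajX, h, h2]; ring
        · have h2 : n % 2 = 0 := by omega
          simp [trajX, h, h2]; ring
      have hy : trajY O (n - 1) - 2 * (if (n - 1) % 2 = 0 then (1:Int) else -1) * O + 3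
          = trajY O n := by
        rcases Int.emod_two_eq_zero_or_one (n - 1) with h | h
        · have h2 : n % 2 = 1 := by omega
          simp [trajY, h, h2]; ring
        · have h2 : n % 2 = 0 := by omega
          simp [trajY, h, h2]; ring
      have hlast : PySem.List.pyGet? (traj_trans_alt L O n) (-1)
          = some [trajX L O (n - 1), trajY O (n - 1)] := by
        rw [PySem.List.pyGet?_neg_one, ih2]
      constructor
      · rw [hr, List.foldl_append, ih1]
        simp only [List.foldl_cons, List.foldl_nil]
        unfold trajStep
        simp only [hlast, Option.getD_some]
        simp only [PySem.List.pyGet?, PySem.List.pyIdx?]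
        norm_num
        rw [halt]
        by_cases hd : (2:Int) ∣ n - 1
        · have h : (n - 1) % 2 = 0 := by omega
          have hdn : ¬ (2:Int) ∣ n := by omega
          simp only [h, if_true] at hx hy
          simp only [hd, hdn, if_true, if_false]
          refine ⟨?_, by norm_num⟩
          rw [show trajX L O (n - 1) - O + L = trajX L O n from by linarith [hx],
              show trajY O (n - 1) - 2 * O + 3 = trajY O n from by linarith [hy]]
        · have h : (n - 1) % 2 = 1 := by omega
          have hh : ¬ ((n - 1) % 2 = 0) := by omega
          have hdn : (2:Int) ∣ n := by omega
          simp only [hh, if_false] at hx hy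
          simp only [hd, hdn, if_true, if_false]
          refine ⟨?_, by norm_num⟩
          rw [show trajX L O (n - 1) - O + -L = trajX L O n from by linarith [hx],
              show trajY O (n - 1) - -(2 * O) + 3 = trajY O n from by linarith [hy]]
      · rw [halt]
        simp

-- ===== VERDICT (by name: the statement is the Claim_ definition above) =====
theorem traj_trans_spec : Claim_equal_traj_trans := by
  intro L O n _
  unfold Spec_traj_trans traj_trans
  by_cases h : 1 ≤ n
  · exact congrArg Prod.fst (traj_loop_inv L O n h).1
  · rw [PySem.List.pyRange_one_eq_nil (by omega)]
    simp [traj_trans_alt, PySem.List.pyRange_one_eq_nil (by omega : n ≤ 1)]
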